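-- pv_equiv track=rewrite | github.com/thevibethinker/n5os-ode | N5/scripts/blocks/dashboard_generator.py | _extract_top_decisions
-- ===== SOURCE A (Python) =====
-- from typing import Dict, Any, List
--
-- def _extract_top_decisions(content: str, limit: int) -> List[Dict[str, str]]:
--     """Extract top N decisions from decisions.md."""
--     decisions = []
--     lines = content.split('\n')
--
--     current_decision = None
--     for line in lines:
--         if line.startswith('### '):
--             if current_decision and len(decisions) < limit:
--                 decisions.append(current_decision)
--             current_decision = {"title": line[4:].strip()}
--         elif line.startswith('**Decision**:') and current_decision:
--             current_decision["content"] = line[13:].strip()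
--
--     if current_decision and len(decisions) < limit:
--         decisions.append(current_decision)
--
--     return decisions[:limit]
-- ===== SOURCE B (Python) =====
-- from typing import Dict, Any, List
--
--
-- def _sections(lines: List[str]) -> List[tuple]:
--     """Group each '### ' header with the body lines up to the next header."""
--     secs = []
--     i, n = 0, len(lines)
--     while i < n:
--         head = lines[i]
--         i += 1
--         if head.startswith('### '):
--             body = []
--             while i < n and not lines[i].startswith('### '):
--                 body.append(lines[i])
--                 i += 1
--             secs.append((head, body))
--     return secs
--
--
-- def _section_dict(header: str, body: List[str]) -> Dict[str, str]:
--     d = {"title": header[4:].strip()}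
--     dec = [ln for ln in body if ln.startswith('**Decision**:')]
--     if dec:
--         d["content"] = dec[-1][13:].strip()
--     return d
--
--
-- def _extract_top_decisions(content: str, limit: int) -> List[Dict[str, str]]:
--     """Extract top N decisions from decisions.md (section-wise decomposition)."""
--     secs = _sections(content.split('\n'))
--     result = [_section_dict(h, body) for (h, body) in secs]
--     return result[:max(0, limit)]
-- ===== Notes on version B (the rewrite author's own statement) =====
-- stated objective: alternative
-- what changed: Replaces A's single stateful line scan (carrying a current-decision dict and an in-loop limit guard) by a two-phase decomposition: first segment the lines into (header, body) sections, then map each section to its dict (content = last Decision line) and take the first max(0,limit) entries.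
import Mathlib
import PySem

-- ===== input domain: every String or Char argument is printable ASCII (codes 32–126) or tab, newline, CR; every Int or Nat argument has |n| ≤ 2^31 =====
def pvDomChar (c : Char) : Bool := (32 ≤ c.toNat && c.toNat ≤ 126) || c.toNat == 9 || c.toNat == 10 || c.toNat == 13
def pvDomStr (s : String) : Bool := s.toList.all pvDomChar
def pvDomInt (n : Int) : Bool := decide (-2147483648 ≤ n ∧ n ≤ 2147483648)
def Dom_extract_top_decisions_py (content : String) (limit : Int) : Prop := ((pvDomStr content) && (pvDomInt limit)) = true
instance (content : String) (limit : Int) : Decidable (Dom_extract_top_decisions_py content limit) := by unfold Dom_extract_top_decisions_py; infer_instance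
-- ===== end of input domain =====

-- B replaces A's single stateful line scan by a two-phase decomposition (segment into
-- (header, body) sections, then map each section to its dict); same result, same cost.


-- shared tiny line helpers (both Pythons contain these same expressions)
def pvIsHeader (line : String) : Bool := PySem.Str.startswith line "### "
def pvIsDec (line : String) : Bool := PySem.Str.startswith line "**Decision**:"
def pvTitle (line : String) : String := PySem.Str.strip (PySem.Str.slice line (some 4) none)
def pvContentVal (line : String) : String := PySem.Str.strip (PySem.Str.slice line (some 13) none)
-- content.split('\n'): split? is none only for sep = "", so getD [] is exact here
def pvLines (content : String) : List String := (PySem.Str.split? content "\n").getD []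

-- ===== PORT A =====
-- truthiness of current_decision ('if current_decision ...'): non-None and non-empty dict
def pvEmitA : Option (PySem.Dict String String) → List (PySem.Dict String String)
  | some cd => if cd.items.isEmpty then [] else [cd]
  | none => []

-- state: (decisions, current_decision)
def pvStepA (limit : Int)
    (st : List (PySem.Dict String String) × Option (PySem.Dict String String))
    (line : String) :
    List (PySem.Dict String String) × Option (PySem.Dict String String) :=
  if pvIsHeader line then
    -- 'if current_decision and len(decisions) < limit: decisions.append(current_decision)'
    (st.1 ++ (if (st.1.length : Int) < limit then pvEmitA st.2 else []),
     some (PySem.Dict.insert PySem.Dict.empty "title" (pvTitle line)))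
  else if pvIsDec line then
    match st.2 with
    | some cd =>
        if cd.items.isEmpty then st
        else (st.1, some (cd.insert "content" (pvContentVal line)))
    | none => st
  else st

def extract_top_decisions_py (content : String) (limit : Int) : List (List (String × String)) :=
  let lines := pvLines content
  let st := lines.foldl (pvStepA limit) ([], none)
  let decisions := st.1 ++ (if (st.1.length : Int) < limit then pvEmitA st.2 else [])
  (PySem.List.slice decisions none (some limit)).map PySem.Dict.items

-- ===== PORT B =====
def pvSections : List String → List (String × List String)
  | [] => []
  | head :: rest =>
    if pvIsHeader head then
      (head, rest.takeWhile (fun l => !pvIsHeader l)) ::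
        pvSections (rest.dropWhile (fun l => !pvIsHeader l))
    else pvSections rest
  termination_by l => l.length
  decreasing_by
  · simpa using Nat.lt_succ_of_le (List.length_dropWhile_le _ _)
  · simp

def pvSectionDict (sec : String × List String) : List (String × String) :=
  match (sec.2.filter pvIsDec).getLast? with
  | none => [("title", pvTitle sec.1)]
  | some d => [("title", pvTitle sec.1), ("content", pvContentVal d)]

def extract_top_decisions_py_alt (content : String) (limit : Int) : List (List (String × String)) :=
  let secs := pvSections (pvLines content)
  (secs.map pvSectionDict).take (max 0 limit).toNat

-- ===== PRECONDITION & SPEC =====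
def Spec_extract_top_decisions_py (content : String) (limit : Int) (out : List (List (String × String))) : Prop := out = extract_top_decisions_py_alt content limit
instance (content : String) (limit : Int) (out : List (List (String × String))) : Decidable (Spec_extract_top_decisions_py content limit out) := by unfold Spec_extract_top_decisions_py; infer_instance

-- ===== CLAIM (what is proved, stated in full; the proofs are below) =====
def Claim_equal_extract_top_decisions_py : Prop := ∀ (content : String) (limit : Int), Dom_extract_top_decisions_py content limit → Spec_extract_top_decisions_py content limit (extract_top_decisions_py content limit)

-- ===== LEMMAS AND PROOFS =====

-- value of the current dict, abstracted as (title, optional content)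
def pvOut (t : String) (c : Option String) : List (String × String) :=
  match c with
  | none => [("title", t)]
  | some cv => [("title", t), ("content", cv)]

def pvMk (t : String) (c : Option String) : PySem.Dict String String :=
  match c with
  | none => PySem.Dict.insert PySem.Dict.empty "title" t
  | some cv => PySem.Dict.insert (PySem.Dict.insert PySem.Dict.empty "title" t) "content" cv

-- the full (un-limited) list of decision dicts A's scan produces
def pvFull : Option (String × Option String) → List String → List (List (String × String))
  | cur, [] => (match cur with | none => [] | some (t, c) => [pvOut t c])
  | cur, l :: ls =>
    if pvIsHeader l then
      (match cur with | none => [] | some (t, c) => [pvOut t c]) ++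
        pvFull (some (pvTitle l, none)) ls
    else if pvIsDec l then
      (match cur with
       | some (t, _) => pvFull (some (t, some (pvContentVal l))) ls
       | none => pvFull none ls)
    else pvFull cur ls

def pvLastDec (c : Option String) (body : List String) : Option String :=
  match (body.filter pvIsDec).getLast? with
  | none => c
  | some d => some (pvContentVal d)

lemma pvMk_items (t : String) (c : Option String) : (pvMk t c).items = pvOut t c := by
  cases c <;> rfl

lemma pvMk_isEmpty (t : String) (c : Option String) : (pvMk t c).items.isEmpty = false := by
  cases c <;> simp [pvMk_items, pvOut]

lemma pvEmitA_mk (t : String) (c : Option String) :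
    pvEmitA (some (pvMk t c)) = [pvMk t c] := by
  simp [pvEmitA, pvMk_isEmpty]

lemma pvMk_none (t : String) : PySem.Dict.empty.insert "title" t = pvMk t none := rfl

lemma pvMk_insert_content (t : String) (c : Option String) (v : String) :
    (pvMk t c).insert "content" v = pvMk t (some v) := by
  cases c <;> rfl

lemma pvA_loop (limit : Int) :
    ∀ (lines : List String) (acc : List (PySem.Dict String String))
      (cur : Option (String × Option String)), (acc.length : Int) ≤ limit →
    (((lines.foldl (pvStepA limit) (acc, cur.map (fun p => pvMk p.1 p.2))).1 ++
        (if ((lines.foldl (pvStepA limit) (acc, cur.map (fun p => pvMk p.1 p.2))).1.length : Int) < limit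
         then pvEmitA (lines.foldl (pvStepA limit) (acc, cur.map (fun p => pvMk p.1 p.2))).2
         else [])).map PySem.Dict.items).take limit.toNat
      = ((acc.map PySem.Dict.items) ++ pvFull cur lines).take limit.toNat := by
  intro lines
  induction lines with
  | nil =>
    intro acc cur hle
    cases cur with
    | none => simp [pvEmitA, pvFull]
    | some p =>
      obtain ⟨t, c⟩ := p
      by_cases hlt : (acc.length : Int) < limit
      · simp [pvFull, hlt, pvEmitA_mk, pvMk_items]
      · have h1 : (acc.map (PySem.Dict.items)).length = limit.toNat := by
          simp; omega
        simp only [List.foldl_nil, Option.map_some, hlt, if_false, List.append_nil, pvFull]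
        rw [List.take_left' h1, List.take_of_length_le (le_of_eq h1)]
  | cons l ls ih =>
    intro acc cur hle
    simp only [List.foldl_cons]
    cases hh : pvIsHeader l
    · cases hd : pvIsDec l
      · have hstep : pvStepA limit (acc, cur.map (fun p => pvMk p.1 p.2)) l
            = (acc, cur.map (fun p => pvMk p.1 p.2)) := by
          simp [pvStepA, hh, hd]
        have hfull : pvFull cur (l :: ls) = pvFull cur ls := by
          cases cur <;> simp [pvFull, hh, hd]
        rw [hstep, hfull]
        exact ih acc cur hle
      · cases cur with
        | none =>
          have hstep : pvStepA limit (acc, (none : Option (String × Option String)).map (fun p => pvMk p.1 p.2)) l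
              = (acc, (none : Option (String × Option String)).map (fun p => pvMk p.1 p.2)) := by
            simp [pvStepA, hh, hd]
          rw [hstep, show pvFull none (l :: ls) = pvFull none ls from by simp [pvFull, hh, hd]]
          exact ih acc none hle
        | some p =>
          obtain ⟨t, c⟩ := p
          have hstep : pvStepA limit (acc, (some (t, c)).map (fun p => pvMk p.1 p.2)) l
              = (acc, (some (t, some (pvContentVal l))).map (fun p => pvMk p.1 p.2)) := by
            simp [pvStepA, hh, hd, pvMk_isEmpty, pvMk_insert_content]
          rw [hstep, show pvFull (some (t, c)) (l :: ls)
                = pvFull (some (t, some (pvContentVal l))) ls from by simp [pvFull, hh, hd]]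
          exact ih acc (some (t, some (pvContentVal l))) hle
    · cases cur with
      | none =>
        have hstep : pvStepA limit (acc, (none : Option (String × Option String)).map (fun p => pvMk p.1 p.2)) l
            = (acc, (some (pvTitle l, (none : Option String))).map (fun p => pvMk p.1 p.2)) := by
          simp [pvStepA, hh, pvEmitA, pvMk]
        rw [hstep, show pvFull none (l :: ls) = pvFull (some (pvTitle l, none)) ls from by
              simp [pvFull, hh]]
        exact ih acc (some (pvTitle l, none)) hle
      | some p =>
        obtain ⟨t, c⟩ := p
        have hfull : pvFull (some (t, c)) (l :: ls)
            = [pvOut t c] ++ pvFull (some (pvTitle l, none)) ls := by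
          simp [pvFull, hh]
        by_cases hlt : (acc.length : Int) < limit
        · have hstep : pvStepA limit (acc, (some (t, c)).map (fun p => pvMk p.1 p.2)) l
              = (acc ++ [pvMk t c], (some (pvTitle l, (none : Option String))).map (fun p => pvMk p.1 p.2)) := by
            simp [pvStepA, hh, hlt, pvEmitA_mk, pvMk_none]
          rw [hstep, hfull]
          have := ih (acc ++ [pvMk t c]) (some (pvTitle l, none)) (by simp; omega)
          simpa [pvMk_items, List.append_assoc] using this
        · have hstep : pvStepA limit (acc, (some (t, c)).map (fun p => pvMk p.1 p.2)) l
              = (acc, (some (pvTitle l, (none : Option String))).map (fun p => pvMk p.1 p.2)) := by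
            simp [pvStepA, hh, hlt, pvMk]
          rw [hstep, hfull]
          have h1 : (acc.map (PySem.Dict.items)).length = limit.toNat := by
            simp; omega
          have := ih acc (some (pvTitle l, none)) hle
          rw [this, List.take_left' h1, List.take_left' h1]


lemma pvA_loop_neg (limit : Int) (hneg : limit < 0) :
    ∀ (lines : List String) (acc : List (PySem.Dict String String))
      (cur0 : Option (PySem.Dict String String)),
      (lines.foldl (pvStepA limit) (acc, cur0)).1 = acc := by
  intro lines
  induction lines with
  | nil => intro acc cur0; rfl
  | cons l ls ih =>
    intro acc cur0
    rw [List.foldl_cons]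
    have hstep : (pvStepA limit (acc, cur0) l).1 = acc := by
      have hlt : ¬((acc.length : Int) < limit) := by
        have : (0 : Int) ≤ (acc.length : Int) := Int.natCast_nonneg _
        omega
      cases hh : pvIsHeader l
      · cases hd : pvIsDec l
        · simp [pvStepA, hh, hd]
        · cases cur0 with
          | none => simp [pvStepA, hh, hd]
          | some cd => cases he : cd.items.isEmpty <;> simp [pvStepA, hh, hd, he]
      · simp [pvStepA, hh, hlt]
    have h2 := ih (pvStepA limit (acc, cur0) l).1 (pvStepA limit (acc, cur0) l).2
    rw [Prod.mk.eta] at h2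
    exact h2.trans hstep

lemma pvLastDec_cons (l : String) (tl : List String) (c : Option String) :
    pvLastDec c (l :: tl) =
      pvLastDec (if pvIsDec l then some (pvContentVal l) else c) tl := by
  unfold pvLastDec
  cases h : pvIsDec l
  · simp [h]
  · cases h2 : tl.filter pvIsDec with
    | nil => simp [h, h2]
    | cons a as => simp [h, h2, List.getLast?_cons]

lemma pvSectionDict_eq (h : String) (body : List String) :
    pvSectionDict (h, body) = pvOut (pvTitle h) (pvLastDec none body) := by
  unfold pvSectionDict pvLastDec
  cases h2 : (body.filter pvIsDec).getLast? <;> simp [pvOut]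

lemma pvFull_some : ∀ (ls : List String) (t : String) (c : Option String),
    pvFull (some (t, c)) ls =
      pvOut t (pvLastDec c (ls.takeWhile (fun l => !pvIsHeader l))) ::
        (pvSections (ls.dropWhile (fun l => !pvIsHeader l))).map pvSectionDict := by
  intro ls
  induction ls with
  | nil => intro t c; simp [pvFull, pvLastDec, pvSections]
  | cons l ls ih =>
    intro t c
    cases hh : pvIsHeader l
    · cases hd : pvIsDec l
      · simp [pvFull, hh, hd, ih, pvLastDec_cons]
      · simp [pvFull, hh, hd, ih, pvLastDec_cons]
    · simp [pvFull, hh, pvSections, ih, pvSectionDict_eq, pvLastDec]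

lemma pvFull_none : ∀ (lines : List String),
    pvFull none lines = (pvSections lines).map pvSectionDict := by
  intro lines
  induction lines with
  | nil => simp [pvFull, pvSections]
  | cons l ls ih =>
    cases hh : pvIsHeader l
    · cases hd : pvIsDec l <;> simp [pvFull, pvSections, hh, hd, ih]
    · simp [pvFull, pvSections, hh, pvFull_some, pvSectionDict_eq]

-- ===== VERDICT (by name: the statement is the Claim_ definition above) =====
theorem extract_top_decisions_py_spec : Claim_equal_extract_top_decisions_py := by
  intro content limit _
  unfold Spec_extract_top_decisions_py
  unfold extract_top_decisions_py extract_top_decisions_py_alt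
  dsimp only
  by_cases hpos : 0 ≤ limit
  · rw [PySem.List.slice_to _ hpos, List.map_take]
    have h := pvA_loop limit (pvLines content) [] none (by simpa using hpos)
    simp only [Option.map_none, List.map_nil, List.nil_append] at h
    rw [show max 0 limit = limit from by omega]
    simpa [pvFull_none] using h
  · have hneg : limit < 0 := by omega
    have h0 := pvA_loop_neg limit hneg (pvLines content) [] none
    simp [h0, PySem.List.slice, show ¬((0 : Int) < limit) from by omega,
      show max 0 limit = 0 from by omega]
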